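-- pv_equiv track=rewrite | github.com/BayramAnnakov/automation-assassin | generate_my_interventions.py | generate_mcp_recommendations
-- ===== SOURCE A (Python) =====
-- def generate_mcp_recommendations(results):
--     """Generate MCP server recommendations"""
--     recommendations = []
--
--     patterns = results['patterns']
--
--     # Check for web development pattern
--     web_dev_switches = sum(v for k, v in patterns.items()
--                            if any(ide in k for ide in ['VS Code', 'Cursor', 'Xcode'])
--                            and any(browser in k for browser in ['Safari', 'Chrome']))
--
--     if web_dev_switches > 50:
--         recommendations.append("""
-- 1. Install Puppeteer MCP for web testing:
--    npm install -g @modelcontextprotocol/server-puppeteer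
--
--    Add to Claude Code settings.json:
--    "mcpServers": {
--      "puppeteer": {
--        "command": "npx",
--        "args": ["@modelcontextprotocol/server-puppeteer"]
--      }
--    }""")
--
--     # Check for GitHub pattern
--     if any('github' in k.lower() or 'git' in k.lower() for k in patterns.keys()):
--         recommendations.append("""
-- 2. Install GitHub MCP for PR reviews:
--    npm install -g @modelcontextprotocol/server-github
--
--    Add to settings.json with your GitHub token""")
--
--     return "\n".join(recommendations) if recommendations else "No specific MCP servers recommended based on your patterns"
-- ===== SOURCE B (Python) =====
-- def generate_mcp_recommendations(results):
--     """Generate MCP server recommendations"""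
--     patterns = results['patterns']
--
--     # Single pass over the patterns: accumulate IDE<->browser switch count
--     # and a flag for any git-related key ('github' contains 'git').
--     web_dev_switches = 0
--     has_git = False
--     for k, v in patterns.items():
--         if (('VS Code' in k or 'Cursor' in k or 'Xcode' in k)
--                 and ('Safari' in k or 'Chrome' in k)):
--             web_dev_switches += v
--         if 'git' in k.lower():
--             has_git = True
--
--     recommendations = (["""
-- 1. Install Puppeteer MCP for web testing:
--    npm install -g @modelcontextprotocol/server-puppeteer
--
--    Add to Claude Code settings.json:
--    "mcpServers": {
--      "puppeteer": {
--        "command": "npx",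
--        "args": ["@modelcontextprotocol/server-puppeteer"]
--      }
--    }"""] if web_dev_switches > 50 else []) + (["""
-- 2. Install GitHub MCP for PR reviews:
--    npm install -g @modelcontextprotocol/server-github
--
--    Add to settings.json with your GitHub token"""] if has_git else [])
--
--     if not recommendations:
--         return "No specific MCP servers recommended based on your patterns"
--     return "\n".join(recommendations)
-- ===== Notes on version B (the rewrite author's own statement) =====
-- stated objective: alternative
-- what changed: Replaces A's two separate scans of the patterns dict (a filtered sum and a separate any over the keys) with one traversal maintaining a running switch count and a git flag ('git' alone suffices since 'github' contains 'git'), then assembles the recommendation list from those two results.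
import Mathlib
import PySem

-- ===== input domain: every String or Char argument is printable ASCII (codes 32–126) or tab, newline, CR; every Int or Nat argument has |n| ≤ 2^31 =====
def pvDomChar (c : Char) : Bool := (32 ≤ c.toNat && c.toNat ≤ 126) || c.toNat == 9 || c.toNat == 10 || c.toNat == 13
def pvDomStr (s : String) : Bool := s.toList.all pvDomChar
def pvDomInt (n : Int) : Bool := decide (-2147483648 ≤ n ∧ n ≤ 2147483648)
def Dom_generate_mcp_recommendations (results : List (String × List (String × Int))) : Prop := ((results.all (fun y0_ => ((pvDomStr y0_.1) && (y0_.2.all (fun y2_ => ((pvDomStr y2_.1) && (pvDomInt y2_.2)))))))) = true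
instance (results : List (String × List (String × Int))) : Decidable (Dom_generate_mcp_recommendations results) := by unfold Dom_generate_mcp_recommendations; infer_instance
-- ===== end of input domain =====

-- B: one traversal of the patterns dict maintaining a switch-count and a git flag, instead of A's two separate scans.


-- the two recommendation texts and the fallback (shared literals)
def pvRec1 : String := "\n1. Install Puppeteer MCP for web testing:\n   npm install -g @modelcontextprotocol/server-puppeteer\n   \n   Add to Claude Code settings.json:\n   \"mcpServers\": {\n     \"puppeteer\": {\n       \"command\": \"npx\",\n       \"args\": [\"@modelcontextprotocol/server-puppeteer\"]\n     }\n   }"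
def pvRec2 : String := "\n2. Install GitHub MCP for PR reviews:\n   npm install -g @modelcontextprotocol/server-github\n   \n   Add to settings.json with your GitHub token"
def pvFallback : String := "No specific MCP servers recommended based on your patterns"

-- ===== PORT A =====
-- the comprehension condition: any IDE substring and any browser substring in k
def pvWebKeyA (k : String) : Bool :=
  (["VS Code", "Cursor", "Xcode"].any (fun ide => PySem.Str.isIn ide k)) &&
  (["Safari", "Chrome"].any (fun browser => PySem.Str.isIn browser k))

def generate_mcp_recommendations (results : List (String × List (String × Int))) : String :=
  match (PySem.Dict.ofList results).get? "patterns" with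
  | none => ""   -- KeyError in Python; excluded by Pre_
  | some pl =>
    let patterns := PySem.Dict.ofList pl
    -- sum(v for k, v in patterns.items() if …)
    let web_dev_switches : Int :=
      patterns.items.foldl (fun acc kv => if pvWebKeyA kv.1 then acc + kv.2 else acc) 0
    let recommendations : List String := if web_dev_switches > 50 then [pvRec1] else []
    -- any('github' in k.lower() or 'git' in k.lower() for k in patterns.keys())
    let recommendations :=
      if patterns.keys.any (fun k =>
           PySem.Str.isIn "github" (PySem.Str.lower k) || PySem.Str.isIn "git" (PySem.Str.lower k))
      then recommendations ++ [pvRec2] else recommendations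
    if recommendations ≠ [] then PySem.Str.join "\n" recommendations else pvFallback

-- ===== PORT B =====
def generate_mcp_recommendations_alt (results : List (String × List (String × Int))) : String :=
  match (PySem.Dict.ofList results).get? "patterns" with
  | none => ""   -- KeyError in Python; excluded by Pre_
  | some pl =>
    -- one pass: (web_dev_switches, has_git)
    let st : Int × Bool :=
      (PySem.Dict.ofList pl).items.foldl
        (fun st kv =>
          ((if ((PySem.Str.isIn "VS Code" kv.1 || PySem.Str.isIn "Cursor" kv.1 || PySem.Str.isIn "Xcode" kv.1)
               && (PySem.Str.isIn "Safari" kv.1 || PySem.Str.isIn "Chrome" kv.1))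
            then st.1 + kv.2 else st.1),
           (st.2 || PySem.Str.isIn "git" (PySem.Str.lower kv.1))))
        (0, false)
    let recommendations : List String :=
      (if st.1 > 50 then [pvRec1] else []) ++ (if st.2 then [pvRec2] else [])
    if recommendations.isEmpty then pvFallback else PySem.Str.join "\n" recommendations

-- ===== PRECONDITION & SPEC =====
-- Pre_ excludes only inputs lacking a 'patterns' key, on which A raises KeyError.
def Pre_generate_mcp_recommendations (results : List (String × List (String × Int))) : Prop :=
  "patterns" ∈ results.map Prod.fst
instance (results : List (String × List (String × Int))) : Decidable (Pre_generate_mcp_recommendations results) := by unfold Pre_generate_mcp_recommendations; infer_instance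
def pvWitness_generate_mcp_recommendations : (List (String × List (String × Int))) := [("patterns", [("GitHub -> VS Code", 3)])]

def Spec_generate_mcp_recommendations (results : List (String × List (String × Int))) (out : String) : Prop := out = generate_mcp_recommendations_alt results
instance (results : List (String × List (String × Int))) (out : String) : Decidable (Spec_generate_mcp_recommendations results out) := by unfold Spec_generate_mcp_recommendations; infer_instance

-- ===== CLAIM (what is proved, stated in full; the proofs are below) =====
def Claim_equal_generate_mcp_recommendations : Prop := ∀ (results : List (String × List (String × Int))), Dom_generate_mcp_recommendations results → Pre_generate_mcp_recommendations results → Spec_generate_mcp_recommendations results (generate_mcp_recommendations results)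

-- ===== LEMMAS AND PROOFS =====

-- 'github' in s implies 'git' in s, so the disjunction collapses
theorem pv_github_or_git (s : String) :
    (PySem.Str.isIn "github" s || PySem.Str.isIn "git" s) = PySem.Str.isIn "git" s := by
  cases h : PySem.Str.isIn "github" s
  · simp
  · simp only [Bool.true_or]
    symm
    rw [PySem.Str.isIn_iff_infix] at h ⊢
    exact List.IsInfix.trans (by decide : ("git".toList <:+: "github".toList)) h

-- B's single fold = A's two separate scans
theorem pv_fold_pair (l : List (String × Int)) (a : Int) (b : Bool) :
    l.foldl
      (fun st kv =>
        ((if ((PySem.Str.isIn "VS Code" kv.1 || PySem.Str.isIn "Cursor" kv.1 || PySem.Str.isIn "Xcode" kv.1)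
             && (PySem.Str.isIn "Safari" kv.1 || PySem.Str.isIn "Chrome" kv.1))
          then st.1 + kv.2 else st.1),
         (st.2 || PySem.Str.isIn "git" (PySem.Str.lower kv.1))))
      (a, b)
    = (l.foldl (fun acc kv => if pvWebKeyA kv.1 then acc + kv.2 else acc) a,
       b || l.any (fun kv => PySem.Str.isIn "git" (PySem.Str.lower kv.1))) := by
  induction l generalizing a b with
  | nil => simp
  | cons kv t ih =>
    simp only [List.foldl_cons, List.any_cons]
    rw [ih]
    simp [pvWebKeyA, Bool.or_assoc]

-- ===== VERDICT (by name: the statement is the Claim_ definition above) =====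
theorem generate_mcp_recommendations_spec : Claim_equal_generate_mcp_recommendations := by
  intro results _ _
  unfold Spec_generate_mcp_recommendations generate_mcp_recommendations generate_mcp_recommendations_alt
  cases h : (PySem.Dict.ofList results).get? "patterns" with
  | none => rfl
  | some pl =>
    simp only [pv_fold_pair]
    have hkeys : (PySem.Dict.ofList pl).keys.any (fun k =>
        PySem.Str.isIn "github" (PySem.Str.lower k) || PySem.Str.isIn "git" (PySem.Str.lower k))
      = (PySem.Dict.ofList pl).items.any (fun kv => PySem.Str.isIn "git" (PySem.Str.lower kv.1)) := by
      simp only [PySem.Dict.keys, List.any_map, pv_github_or_git]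
      rfl
    rw [hkeys]
    set w := (PySem.Dict.ofList pl).items.foldl (fun acc kv => if pvWebKeyA kv.1 then acc + kv.2 else acc) (0 : Int)
    set g := (PySem.Dict.ofList pl).items.any (fun kv => PySem.Str.isIn "git" (PySem.Str.lower kv.1))
    by_cases hw : w > 50 <;> cases hg : g <;>
      simp [hw, PySem.Str.join, List.isEmpty]
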